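-- pv_equiv track=rewrite | github.com/ase2026participant/ASE-2026 | Assertion-Utility/SSA-Variable_Gen/ssa_analyzer/ssa_analyzer/derived_naming.py | detect_shortcircuit
-- ===== SOURCE A (Python) =====
-- from typing import List, Dict, Tuple, Optional, Set
--
-- def detect_shortcircuit(expr: str) -> Tuple[bool, bool]:
--     """
--     Detect short-circuit operators in expression.
--
--     Args:
--         expr: Expression string
--
--     Returns:
--         Tuple of (has_and, has_or) indicating presence of && and ||
--     """
--     # Detect top-level && and || (respecting parentheses)
--     depth = 0
--     has_and = False
--     has_or = False
--
--     i = 0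
--     while i < len(expr):
--         if expr[i] == '(':
--             depth += 1
--         elif expr[i] == ')':
--             depth -= 1
--         elif depth == 0:
--             if i < len(expr) - 1 and expr[i:i+2] == '&&':
--                 has_and = True
--                 i += 1
--             elif i < len(expr) - 1 and expr[i:i+2] == '||':
--                 has_or = True
--                 i += 1
--         i += 1
--
--     return (has_and, has_or)
-- ===== SOURCE B (Python) =====
-- def detect_shortcircuit(expr: str):
--     """Positional re-implementation: an operator occurrence at p is top-level
--     iff the prefix expr[:p] has equally many '(' and ')'."""
--     def top_level(op):
--         return any(expr[:p].count('(') == expr[:p].count(')')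
--                    for p in range(len(expr) - 1)
--                    if expr[p:p+2] == op)
--     return (top_level('&&'), top_level('||'))
-- ===== Notes on version B (the rewrite author's own statement) =====
-- stated objective: alternative
-- what changed: Replaced A's single stateful scan (mutable depth counter, index skipping after a match) by a positional formulation: an operator occurrence at position p is top-level iff the prefix expr[:p] contains equally many '(' and ')'; presence is an any() over all positions.
import Mathlib
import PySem

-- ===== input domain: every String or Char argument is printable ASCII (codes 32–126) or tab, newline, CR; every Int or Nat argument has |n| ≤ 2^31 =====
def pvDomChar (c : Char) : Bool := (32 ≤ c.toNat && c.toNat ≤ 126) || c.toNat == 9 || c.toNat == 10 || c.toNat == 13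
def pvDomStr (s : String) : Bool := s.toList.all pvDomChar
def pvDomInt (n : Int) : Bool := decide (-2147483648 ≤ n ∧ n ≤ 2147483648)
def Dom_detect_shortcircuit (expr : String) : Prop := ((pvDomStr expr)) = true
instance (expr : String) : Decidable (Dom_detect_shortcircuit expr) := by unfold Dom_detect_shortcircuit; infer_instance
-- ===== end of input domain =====

-- B replaces A's stateful depth-tracking scan by a positional test (each '&&'/'||'
-- occurrence is top-level iff its prefix has balanced parens); objective: alternative.

-- ===== PORT A =====
-- A's while-loop: index i becomes the remaining suffix; depth/has_and/has_or are the state.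
def detectLoopA : List Char → Int → Bool → Bool → Bool × Bool
  | [], _, ha, ho => (ha, ho)
  | c :: rest, depth, ha, ho =>
    if c = '(' then detectLoopA rest (depth + 1) ha ho
    else if c = ')' then detectLoopA rest (depth - 1) ha ho
    else if depth = 0 then
      match h : rest with
      | c2 :: rest2 =>
        if c = '&' && c2 = '&' then detectLoopA rest2 depth true ho
        else if c = '|' && c2 = '|' then detectLoopA rest2 depth ha true
        else detectLoopA rest depth ha ho
      | [] => (ha, ho)
    else detectLoopA rest depth ha ho
termination_by cs _ _ _ => cs.length
decreasing_by all_goals simp_all <;> omega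

def detect_shortcircuit (expr : String) : Bool × Bool :=
  detectLoopA expr.toList 0 false false

-- ===== PORT B =====
-- B's generator: any position p < len-1 where expr[p:p+2] == op and expr[:p] has
-- equally many '(' and ')'.
def topLevelHit (cs : List Char) (a b : Char) : Bool :=
  (List.range (cs.length - 1)).any fun p =>
    decide ((cs.drop p).take 2 = [a, b]) &&
    decide ((cs.take p).count '(' = (cs.take p).count ')')

def detect_shortcircuit_alt (expr : String) : Bool × Bool :=
  (topLevelHit expr.toList '&' '&', topLevelHit expr.toList '|' '|')

-- ===== PRECONDITION & SPEC =====
def Spec_detect_shortcircuit (expr : String) (out : Bool × Bool) : Prop := out = detect_shortcircuit_alt expr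
instance (expr : String) (out : Bool × Bool) : Decidable (Spec_detect_shortcircuit expr out) := by unfold Spec_detect_shortcircuit; infer_instance

-- ===== CLAIM (what is proved, stated in full; the proofs are below) =====
def Claim_equal_detect_shortcircuit : Prop := ∀ (expr : String), Dom_detect_shortcircuit expr → Spec_detect_shortcircuit expr (detect_shortcircuit expr)

-- ===== LEMMAS AND PROOFS =====

theorem pvAnyCongr {α : Type} (l : List α) (f g : α → Bool)
    (h : ∀ x ∈ l, f x = g x) : l.any f = l.any g := by
  induction l with
  | nil => rfl
  | cons x xs ih =>
    simp only [List.any_cons, h x (by simp), ih fun y hy => h y (by simp [hy])]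

-- paren contribution of one char
def pvDelta (c : Char) : Int := if c = '(' then 1 else if c = ')' then -1 else 0

-- signed paren balance of a prefix
def pvBal (l : List Char) : Int := (l.count '(' : Int) - (l.count ')' : Int)

-- intermediate characterisation: "some occurrence of [a,b] at depth 0, starting depth d"
def pvTl : List Char → Int → Char → Char → Bool
  | [], _, _, _ => false
  | [_], _, _, _ => false
  | c :: c2 :: rest, d, a, b =>
      (d == 0 && c == a && c2 == b) || pvTl (c2 :: rest) (d + pvDelta c) a b

theorem pvBal_cons (c : Char) (l : List Char) : pvBal (c :: l) = pvDelta c + pvBal l := by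
  simp only [pvBal, pvDelta, List.count_cons]
  split_ifs with h1 h2 <;> simp_all <;> omega

theorem pvTl_skip (c : Char) (l : List Char) (d : Int) (a b : Char)
    (h0 : pvDelta c = 0) (hne : c ≠ a) : pvTl (c :: l) d a b = pvTl l d a b := by
  cases l with
  | nil => rfl
  | cons c2 l' =>
    simp only [pvTl, h0, add_zero]
    simp [hne]

theorem loopA_eq_aux : ∀ (n : Nat) (cs : List Char), cs.length ≤ n → ∀ (d : Int) (ha ho : Bool),
    detectLoopA cs d ha ho = (ha || pvTl cs d '&' '&', ho || pvTl cs d '|' '|') := by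
  intro n
  induction n with
  | zero =>
    intro cs hlen d ha ho
    have : cs = [] := by cases cs <;> simp_all
    subst this
    simp [detectLoopA, pvTl]
  | succ n ih =>
    intro cs hlen d ha ho
    cases cs with
    | nil => simp [detectLoopA, pvTl]
    | cons c rest =>
      rw [detectLoopA.eq_def]
      simp only []
      by_cases h1 : c = '('
      · subst h1
        rw [if_pos rfl]
        cases rest with
        | nil => simp [detectLoopA, pvTl]
        | cons c2 r =>
          rw [ih _ (by simpa using hlen)]
          simp [pvTl, pvDelta]
      · by_cases h2 : c = ')'
        · subst h2
          rw [if_neg h1, if_pos rfl]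
          cases rest with
          | nil => simp [detectLoopA, pvTl]
          | cons c2 r =>
            rw [ih _ (by simpa using hlen)]
            simp [pvTl, pvDelta, h1, sub_eq_add_neg]
        · have hd0 : pvDelta c = 0 := by simp [pvDelta, h1, h2]
          rw [if_neg h1, if_neg h2]
          by_cases hd : d = 0
          · subst hd
            rw [if_pos rfl]
            split
            · -- the match hit the cons pattern
              rename_i c2 rest2
              by_cases hand : c = '&' ∧ c2 = '&'
              · obtain ⟨hc1, hc2⟩ := hand
                subst hc1 hc2
                rw [if_pos (by decide)]
                rw [ih _ (by simp at hlen ⊢; omega)]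
                refine Prod.ext ?_ ?_
                · simp [pvTl]
                · simp only [pvTl]
                  rw [pvTl_skip '&' rest2 (0 + pvDelta '&') '|' '|' (by decide) (by decide)]
                  simp [pvDelta]
              · by_cases hor : c = '|' ∧ c2 = '|'
                · obtain ⟨hc1, hc2⟩ := hor
                  subst hc1 hc2
                  rw [if_neg (by decide), if_pos (by decide)]
                  rw [ih _ (by simp at hlen ⊢; omega)]
                  refine Prod.ext ?_ ?_
                  · simp only [pvTl]
                    rw [pvTl_skip '|' rest2 (0 + pvDelta '|') '&' '&' (by decide) (by decide)]
                    simp [pvDelta]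
                  · simp [pvTl]
                · have hba : (c == '&' && c2 == '&') = false := by
                    rcases not_and_or.mp hand with h | h <;> simp [h]
                  have hbo : (c == '|' && c2 == '|') = false := by
                    rcases not_and_or.mp hor with h | h <;> simp [h]
                  rw [if_neg (by simp [hba]; tauto), if_neg (by simp [hbo]; tauto)]
                  rw [ih _ (by simpa using hlen)]
                  refine Prod.ext ?_ ?_ <;>
                    simp [pvTl, hd0, hba, hbo]
            · -- the match hit the nil pattern
              simp [pvTl]
          · rw [if_neg hd]
            have hbeq : (d == (0 : Int)) = false := beq_eq_false_iff_ne.mpr hd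
            cases rest with
            | nil => simp [detectLoopA, pvTl]
            | cons c2 r =>
              rw [ih _ (by simpa using hlen)]
              simp [pvTl, hd0, hbeq]

theorem pvTl_any (cs : List Char) (d : Int) (a b : Char) :
    pvTl cs d a b =
      (List.range (cs.length - 1)).any (fun p =>
        decide ((cs.drop p).take 2 = [a, b]) && decide (d + pvBal (cs.take p) = 0)) := by
  induction cs generalizing d with
  | nil => simp [pvTl]
  | cons c cs' ih =>
    cases cs' with
    | nil => simp [pvTl]
    | cons c2 cs'' =>
      have hlen : (c :: c2 :: cs'').length - 1 = cs''.length + 1 := by simp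
      rw [hlen, List.range_succ_eq_map]
      simp only [pvTl, List.any_cons, List.any_map]
      congr 1
      · -- head case: p = 0
        simp only [List.drop_zero, List.take_zero, pvBal, List.count_nil]
        by_cases hd : d = 0 <;> by_cases hc1 : c = a <;> by_cases hc2 : c2 = b <;>
          simp [hd, hc1, hc2, List.take]
      · -- tail: p = p'+1
        rw [ih (d + pvDelta c)]
        have hlen2 : (c2 :: cs'').length - 1 = cs''.length := by simp
        rw [hlen2]
        refine pvAnyCongr _ _ _ fun p _ => ?_
        simp only [Function.comp_apply, List.drop_succ_cons, List.take_succ_cons, pvBal_cons]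
        congr 1
        simp only [decide_eq_decide]
        omega

theorem topLevelHit_eq (cs : List Char) (a b : Char) :
    topLevelHit cs a b = pvTl cs 0 a b := by
  rw [pvTl_any, topLevelHit]
  refine pvAnyCongr _ _ _ fun p _ => ?_
  congr 1
  simp only [decide_eq_decide, pvBal]
  omega

-- ===== VERDICT (by name: the statement is the Claim_ definition above) =====
theorem detect_shortcircuit_spec : Claim_equal_detect_shortcircuit := by
  intro expr _
  show detect_shortcircuit expr = detect_shortcircuit_alt expr
  rw [detect_shortcircuit, detect_shortcircuit_alt,
      loopA_eq_aux expr.toList.length expr.toList le_rfl,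
      topLevelHit_eq, topLevelHit_eq]
  simp
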